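-- pv_equiv track=rewrite | github.com/im876/Python-Codes | Codes/terms_of_AP.py | termsOfAP
-- ===== SOURCE A (Python) =====
-- def termsOfAP(x):
--
--     # Declaring a vector to store all the elements which are to be returned.
--     ans = [0 for i in range(x)]
--
--     # Declaring variable to have a look at number of elements in 'ANS' vector.
--     got = 0
--
--     # Pointing to current number of series 3N + 2.
--     curr = 5
--
--     # Running a loop until total number of elements in 'ANS' is not equal to 'X'.
--     while(got != x):
--
--         # If curr value of series is not divisible by 4 then we will append it at
--         # the end of 'ANS' vector and increment the value of 'GOT' by 1.
--         if curr % 4 != 0: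
--             ans[got] = curr
--             got += 1
--
--         # Getting the next value of series by incrementing by 3.
--         curr += 3
--
--     # Finally we will return our 'ANS' vector.
--     return ans
-- ===== SOURCE B (Python) =====
-- def termsOfAP(x):
--     # Kept terms of 3N+2 not divisible by 4 are periodic: increments cycle 6,3,3
--     # so the i-th term is 5 + 12*(i//3) + (0, 6, 9)[i % 3].
--     return [5 + 12 * (i // 3) + (0, 6, 9)[i % 3] for i in range(x)]
-- ===== Notes on version B (the rewrite author's own statement) =====
-- stated objective: idiomatic
-- what changed: Replaced A's scan of the whole 3N+2 series with modulo-4 filtering into a preallocated mutable buffer by a one-line comprehension computing each kept term directly from its index via the period-3 closed form 5 + 12*(i//3) + (0,6,9)[i%3].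
import Mathlib
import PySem

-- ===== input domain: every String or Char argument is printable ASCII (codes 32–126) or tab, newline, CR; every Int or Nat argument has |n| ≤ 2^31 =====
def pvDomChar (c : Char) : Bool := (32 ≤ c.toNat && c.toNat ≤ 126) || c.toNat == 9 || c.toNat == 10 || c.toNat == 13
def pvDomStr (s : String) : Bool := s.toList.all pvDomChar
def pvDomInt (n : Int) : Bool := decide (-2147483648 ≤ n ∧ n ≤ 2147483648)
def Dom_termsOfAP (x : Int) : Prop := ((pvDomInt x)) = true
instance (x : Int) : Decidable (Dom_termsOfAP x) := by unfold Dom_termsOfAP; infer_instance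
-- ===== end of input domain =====

-- B replaces A's filtered scan of the 3N+2 series by a closed-form per-index formula.
-- Return-value equivalence for all x ≥ 0 (A raises IndexError for x < 0).

-- ===== PORT A =====
-- A's while loop: fuel-bounded structural recursion over the same state (ans, got, curr);
-- 2*x+1 iterations always suffice (at most one skipped candidate per kept term).
def apLoopA : Nat → List Int → Nat → Nat → Int → List Int
  | 0, ans, _, _, _ => ans
  | fuel + 1, ans, got, n, curr =>
    if got = n then ans
    else if curr % 4 ≠ 0 then apLoopA fuel (ans.set got curr) (got + 1) n (curr + 3)
    else apLoopA fuel ans got n (curr + 3)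

def termsOfAP (x : Int) : List Int :=
  apLoopA (2 * x.toNat + 1) (List.replicate x.toNat 0) 0 x.toNat 5

-- ===== PORT B =====
def termsOfAP_alt (x : Int) : List Int :=
  (PySem.List.pyRange 0 x 1).map
    (fun i => 5 + 12 * PySem.Int.floordiv i 3 + PySem.List.pyGetD [0, 6, 9] (PySem.Int.mod i 3) 0)

-- ===== PRECONDITION & SPEC =====
-- Pre_ excludes x < 0, on which Python A raises IndexError (assignment into an empty preallocated list).
def Pre_termsOfAP (x : Int) : Prop := 0 ≤ x
instance (x : Int) : Decidable (Pre_termsOfAP x) := by unfold Pre_termsOfAP; infer_instance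
def pvWitness_termsOfAP : Int := (7)

def Spec_termsOfAP (x : Int) (out : List Int) : Prop := out = termsOfAP_alt x
instance (x : Int) (out : List Int) : Decidable (Spec_termsOfAP x out) := by unfold Spec_termsOfAP; infer_instance

-- ===== CLAIM (what is proved, stated in full; the proofs are below) =====
def Claim_equal_termsOfAP : Prop := ∀ (x : Int), Dom_termsOfAP x → Pre_termsOfAP x → Spec_termsOfAP x (termsOfAP x)
-- ===== LEMMAS AND PROOFS =====

-- the closed-form value of the g-th kept term, as a Nat
def fNat (g : Nat) : Nat := 5 + 12 * (g / 3) + (if g % 3 = 1 then 6 else if g % 3 = 2 then 9 else 0)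

lemma fNat_mod_four (g : Nat) : fNat g % 4 ≠ 0 := by
  unfold fNat; split_ifs <;> omega

lemma fNat_succ_clean (g : Nat) (h : (g + 1) % 3 ≠ 1) : fNat g + 3 = fNat (g + 1) := by
  unfold fNat; split_ifs <;> omega

lemma fNat_succ_skip (g : Nat) (h : (g + 1) % 3 = 1) : fNat g + 3 = fNat (g + 1) - 3 ∧ 3 ≤ fNat (g + 1) := by
  unfold fNat; split_ifs <;> omega

lemma fNat_skip_mod_four (g : Nat) (h : g % 3 = 1) : (fNat g - 3) % 4 = 0 := by
  unfold fNat; split_ifs <;> omega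

lemma int_mod_cast_ne (a : Nat) : ((a : Int) % 4 ≠ 0) ↔ a % 4 ≠ 0 := by omega

-- main loop invariant: at the loop head with g terms found, curr is either the next kept
-- term fNat g (clean state) or the skipped candidate fNat g - 3 (only when g % 3 = 1);
-- the loop fills positions g..g+d-1 with fNat g .. fNat (g+d-1).
lemma apLoopA_invariant (fuel : Nat) :
    ∀ (d g : Nat) (ans : List Int) (curr : Int),
      ans.length = g + d →
      ((curr = (fNat g : Int) ∧ 2 * d ≤ fuel) ∨
        (g % 3 = 1 ∧ curr = (fNat g : Int) - 3 ∧ 2 * d + 1 ≤ fuel)) →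
      apLoopA fuel ans g (g + d) curr =
        ans.take g ++ (List.range d).map (fun j => (fNat (g + j) : Int)) := by
  induction fuel with
  | zero =>
    intro d g ans curr hlen hst
    rcases hst with ⟨hc, hf⟩ | ⟨_, _, hf⟩
    · have hd : d = 0 := by omega
      subst hd
      simp [apLoopA]; omega
    · omega
  | succ fuel ih =>
    intro d g ans curr hlen hst
    by_cases hdz : d = 0
    · subst hdz
      simp [apLoopA]; omega
    · have hgn : g ≠ g + d := by omega
      rcases hst with ⟨hc, hf⟩ | ⟨hg3, hc, hf⟩
      · -- clean state: keep fNat g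
        have hmod : curr % 4 ≠ 0 := by
          rw [hc, int_mod_cast_ne]; exact fNat_mod_four g
        rw [apLoopA, if_neg hgn, if_pos hmod]
        have harr : g + d = (g + 1) + (d - 1) := by omega
        have hlen' : (ans.set g curr).length = (g + 1) + (d - 1) := by
          simp [hlen]; omega
        have hnext : ((curr + 3 = (fNat (g + 1) : Int) ∧ 2 * (d - 1) ≤ fuel) ∨
            ((g + 1) % 3 = 1 ∧ curr + 3 = (fNat (g + 1) : Int) - 3 ∧ 2 * (d - 1) + 1 ≤ fuel)) := by
          by_cases hs : (g + 1) % 3 = 1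
          · right
            refine ⟨hs, ?_, by omega⟩
            have := fNat_succ_skip g hs
            rw [hc]; omega
          · left
            refine ⟨?_, by omega⟩
            have := fNat_succ_clean g hs
            rw [hc]; omega
        have := ih (d - 1) (g + 1) (ans.set g curr) (curr + 3) hlen' hnext
        rw [harr, this]
        -- combine prefixes: (ans.set g curr).take (g+1) = ans.take g ++ [fNat g]
        have hglt : g < ans.length := by omega
        have hrange : (List.range d).map (fun j => (fNat (g + j) : Int)) =
            (fNat g : Int) :: (List.range (d - 1)).map (fun j => (fNat (g + 1 + j) : Int)) := by
          have hd1 : d = (d - 1) + 1 := by omega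
          rw [hd1, List.range_succ_eq_map]
          simp [Function.comp, Nat.add_comm, Nat.add_left_comm]
        rw [hrange]
        have hset : ans.set g curr = ans.take g ++ curr :: ans.drop (g + 1) :=
          List.set_eq_take_cons_drop curr hglt
        have htk : (ans.set g curr).take (g + 1) = ans.take g ++ [curr] := by
          rw [hset]
          have hg : g = (ans.take g).length := by simp; omega
          rw [show g + 1 = (ans.take g).length + 1 by omega, List.take_append]
          simp
        rw [htk, hc]
        simp
      · -- skip state: curr = fNat g - 3 is divisible by 4
        have hmod : ¬ curr % 4 ≠ 0 := by
          have h3 : 3 ≤ fNat g := by unfold fNat; omega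
          have := fNat_skip_mod_four g hg3
          simp only [not_not]
          omega
        rw [apLoopA, if_neg hgn, if_neg hmod]
        apply ih d g ans (curr + 3) hlen
        left
        constructor
        · have h3 : 3 ≤ fNat g := by unfold fNat; omega
          rw [hc]; omega
        · omega

-- characterise A in closed form
lemma termsOfAP_eq (x : Int) :
    termsOfAP x = (List.range x.toNat).map (fun j => (fNat j : Int)) := by
  unfold termsOfAP
  have h5 : (5 : Int) = (fNat 0 : Int) := by unfold fNat; norm_num
  have := apLoopA_invariant (2 * x.toNat + 1) x.toNat 0 (List.replicate x.toNat 0) 5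
    (by simp) (Or.inl ⟨h5, by omega⟩)
  simpa using this

-- characterise B in closed form
lemma termsOfAP_alt_eq (x : Int) :
    termsOfAP_alt x = (List.range x.toNat).map (fun j => (fNat j : Int)) := by
  unfold termsOfAP_alt
  rw [PySem.List.pyRange_one]
  simp only [sub_zero, List.map_map]
  apply List.map_congr_left
  intro k hk
  simp only [Function.comp, zero_add]
  rw [PySem.Int.floordiv_eq_ediv_of_pos (by norm_num), PySem.Int.mod_eq_emod_of_pos (by norm_num)]
  have hm : (k : Int) % 3 = ((k % 3 : Nat) : Int) := by push_cast; ring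
  rw [hm, PySem.List.pyGetD_natCast]
  have h3 : k % 3 < 3 := Nat.mod_lt k (by norm_num)
  interval_cases h : k % 3 <;> simp [fNat, h]

-- ===== VERDICT (by name: the statement is the Claim_ definition above) =====
theorem termsOfAP_spec : Claim_equal_termsOfAP := by
  intro x _ _
  unfold Spec_termsOfAP
  rw [termsOfAP_eq x, termsOfAP_alt_eq x]
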